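-- pv_equiv track=rewrite | github.com/luisvmelo/startups-rip-scraper | corpus_analytics.py | _company_macros
-- ===== SOURCE A (Python) =====
-- CATEGORY_MACROS_LITE = {
--     "finance":    {"fintech", "finance", "financial", "banking", "payments",
--                    "lending", "insurance", "insurtech", "crypto", "blockchain"},
--     "health":     {"healthcare", "health tech", "healthtech", "biotech",
--                    "medical", "medtech", "diagnostics", "telehealth"},
--     "software":   {"saas", "software", "b2b", "b2b2c", "developer tools",
--                    "devtools", "infrastructure", "api", "platform", "enterprise",
--                    "cloud", "productivity"},
--     "consumer":   {"consumer", "b2c", "marketplace", "e-commerce", "retail",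
--                    "lifestyle", "social", "entertainment", "gaming"},
--     "ai":         {"ai", "artificial intelligence", "machine learning",
--                    "deep learning", "data", "analytics"},
--     "education":  {"education", "edtech", "learning", "training"},
--     "logistics":  {"logistics", "supply chain", "transport", "mobility",
--                    "delivery"},
--     "energy":     {"energy", "climate", "cleantech", "sustainability",
--                    "renewable"},
--     "industrial": {"industrial", "manufacturing", "robotics", "hardware"},
--     "media":      {"media", "content", "publishing", "advertising", "marketing"},
--     "real_estate":{"real estate", "proptech", "construction"},
--     "agri":       {"agriculture", "agtech", "food", "farming"},
--     "security":   {"security", "cybersecurity", "privacy"},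
--     "hr":         {"hr", "recruiting", "talent", "people", "human resources"},
--     "legal":      {"legal", "legaltech", "compliance", "regulatory"},
-- }
--
-- def _company_macros(c: dict) -> set[str]:
--     """Tenta usar category_macros já enriquecidos; fallback pelas categorias."""
--     if c.get("category_macros"):
--         return set(c["category_macros"])
--     macros = set()
--     cats_lower = {(cat or "").lower() for cat in c.get("categories", [])}
--     for macro, kw in CATEGORY_MACROS_LITE.items():
--         if cats_lower & kw:
--             macros.add(macro)
--     return macros
-- ===== SOURCE B (Python) =====
-- # Inverted index: the per-company work is one comprehension over a flat
-- # keyword -> macro table instead of 15 set intersections.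
--
-- # keyword -> macro, flat (no keyword belongs to two macros).
-- KEYWORD_TO_MACRO = {
--     "fintech": "finance", "finance": "finance", "financial": "finance",
--     "banking": "finance", "payments": "finance", "lending": "finance",
--     "insurance": "finance", "insurtech": "finance", "crypto": "finance",
--     "blockchain": "finance",
--     "healthcare": "health", "health tech": "health", "healthtech": "health",
--     "biotech": "health", "medical": "health", "medtech": "health",
--     "diagnostics": "health", "telehealth": "health",
--     "saas": "software", "software": "software", "b2b": "software",
--     "b2b2c": "software", "developer tools": "software", "devtools": "software",
--     "infrastructure": "software", "api": "software", "platform": "software",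
--     "enterprise": "software", "cloud": "software", "productivity": "software",
--     "consumer": "consumer", "b2c": "consumer", "marketplace": "consumer",
--     "e-commerce": "consumer", "retail": "consumer", "lifestyle": "consumer",
--     "social": "consumer", "entertainment": "consumer", "gaming": "consumer",
--     "ai": "ai", "artificial intelligence": "ai", "machine learning": "ai",
--     "deep learning": "ai", "data": "ai", "analytics": "ai",
--     "education": "education", "edtech": "education", "learning": "education",
--     "training": "education",
--     "logistics": "logistics", "supply chain": "logistics",
--     "transport": "logistics", "mobility": "logistics", "delivery": "logistics",
--     "energy": "energy", "climate": "energy", "cleantech": "energy",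
--     "sustainability": "energy", "renewable": "energy",
--     "industrial": "industrial", "manufacturing": "industrial",
--     "robotics": "industrial", "hardware": "industrial",
--     "media": "media", "content": "media", "publishing": "media",
--     "advertising": "media", "marketing": "media",
--     "real estate": "real_estate", "proptech": "real_estate",
--     "construction": "real_estate",
--     "agriculture": "agri", "agtech": "agri", "food": "agri", "farming": "agri",
--     "security": "security", "cybersecurity": "security", "privacy": "security",
--     "hr": "hr", "recruiting": "hr", "talent": "hr", "people": "hr",
--     "human resources": "hr",
--     "legal": "legal", "legaltech": "legal", "compliance": "legal",
--     "regulatory": "legal",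
-- }
--
-- def _company_macros(c: dict) -> set[str]:
--     if c.get("category_macros"):
--         return set(c["category_macros"])
--     cats_lower = {(cat or "").lower() for cat in c.get("categories", [])}
--     return {macro for kw, macro in KEYWORD_TO_MACRO.items() if kw in cats_lower}
-- ===== Notes on version B (the rewrite author's own statement) =====
-- stated objective: alternative
-- what changed: Replaces A's loop over the 15 macro keyword-sets performing a set intersection for each by a single comprehension over a precomputed flat keyword-to-macro inverted table with set-membership tests; the early return on enriched category_macros is kept.
import Mathlib
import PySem

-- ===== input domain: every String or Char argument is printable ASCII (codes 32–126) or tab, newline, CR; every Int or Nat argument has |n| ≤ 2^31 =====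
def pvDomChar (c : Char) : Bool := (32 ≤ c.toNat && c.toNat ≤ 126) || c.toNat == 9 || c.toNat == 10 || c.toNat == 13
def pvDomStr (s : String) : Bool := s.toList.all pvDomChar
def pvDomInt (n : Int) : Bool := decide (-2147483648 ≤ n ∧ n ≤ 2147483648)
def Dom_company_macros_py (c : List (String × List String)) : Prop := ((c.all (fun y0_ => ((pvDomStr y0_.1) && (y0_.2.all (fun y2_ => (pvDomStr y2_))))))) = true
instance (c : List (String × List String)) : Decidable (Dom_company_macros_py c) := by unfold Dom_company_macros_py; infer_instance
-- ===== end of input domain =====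

-- B replaces A's loop over 15 macro keyword-sets (a set intersection each) by one pass over a
-- flat precomputed keyword→macro table with set-membership tests (objective: alternative data structure).

-- ===== PORT A =====
-- CATEGORY_MACROS_LITE: the 15 macro → keyword-set pairs, in dict insertion order
def catMacrosLite : List (String × List String) := [
  ("finance", ["fintech", "finance", "financial", "banking", "payments", "lending", "insurance", "insurtech", "crypto", "blockchain"]),
  ("health", ["healthcare", "health tech", "healthtech", "biotech", "medical", "medtech", "diagnostics", "telehealth"]),
  ("software", ["saas", "software", "b2b", "b2b2c", "developer tools", "devtools", "infrastructure", "api", "platform", "enterprise", "cloud", "productivity"]),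
  ("consumer", ["consumer", "b2c", "marketplace", "e-commerce", "retail", "lifestyle", "social", "entertainment", "gaming"]),
  ("ai", ["ai", "artificial intelligence", "machine learning", "deep learning", "data", "analytics"]),
  ("education", ["education", "edtech", "learning", "training"]),
  ("logistics", ["logistics", "supply chain", "transport", "mobility", "delivery"]),
  ("energy", ["energy", "climate", "cleantech", "sustainability", "renewable"]),
  ("industrial", ["industrial", "manufacturing", "robotics", "hardware"]),
  ("media", ["media", "content", "publishing", "advertising", "marketing"]),
  ("real_estate", ["real estate", "proptech", "construction"]),
  ("agri", ["agriculture", "agtech", "food", "farming"]),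
  ("security", ["security", "cybersecurity", "privacy"]),
  ("hr", ["hr", "recruiting", "talent", "people", "human resources"]),
  ("legal", ["legal", "legaltech", "compliance", "regulatory"])
]

def keywordToMacro : List (String × String) := [
  ("fintech", "finance"),
  ("finance", "finance"),
  ("financial", "finance"),
  ("banking", "finance"),
  ("payments", "finance"),
  ("lending", "finance"),
  ("insurance", "finance"),
  ("insurtech", "finance"),
  ("crypto", "finance"),
  ("blockchain", "finance"),
  ("healthcare", "health"),
  ("health tech", "health"),
  ("healthtech", "health"),
  ("biotech", "health"),
  ("medical", "health"),
  ("medtech", "health"),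
  ("diagnostics", "health"),
  ("telehealth", "health"),
  ("saas", "software"),
  ("software", "software"),
  ("b2b", "software"),
  ("b2b2c", "software"),
  ("developer tools", "software"),
  ("devtools", "software"),
  ("infrastructure", "software"),
  ("api", "software"),
  ("platform", "software"),
  ("enterprise", "software"),
  ("cloud", "software"),
  ("productivity", "software"),
  ("consumer", "consumer"),
  ("b2c", "consumer"),
  ("marketplace", "consumer"),
  ("e-commerce", "consumer"),
  ("retail", "consumer"),
  ("lifestyle", "consumer"),
  ("social", "consumer"),
  ("entertainment", "consumer"),
  ("gaming", "consumer"),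
  ("ai", "ai"),
  ("artificial intelligence", "ai"),
  ("machine learning", "ai"),
  ("deep learning", "ai"),
  ("data", "ai"),
  ("analytics", "ai"),
  ("education", "education"),
  ("edtech", "education"),
  ("learning", "education"),
  ("training", "education"),
  ("logistics", "logistics"),
  ("supply chain", "logistics"),
  ("transport", "logistics"),
  ("mobility", "logistics"),
  ("delivery", "logistics"),
  ("energy", "energy"),
  ("climate", "energy"),
  ("cleantech", "energy"),
  ("sustainability", "energy"),
  ("renewable", "energy"),
  ("industrial", "industrial"),
  ("manufacturing", "industrial"),
  ("robotics", "industrial"),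
  ("hardware", "industrial"),
  ("media", "media"),
  ("content", "media"),
  ("publishing", "media"),
  ("advertising", "media"),
  ("marketing", "media"),
  ("real estate", "real_estate"),
  ("proptech", "real_estate"),
  ("construction", "real_estate"),
  ("agriculture", "agri"),
  ("agtech", "agri"),
  ("food", "agri"),
  ("farming", "agri"),
  ("security", "security"),
  ("cybersecurity", "security"),
  ("privacy", "security"),
  ("hr", "hr"),
  ("recruiting", "hr"),
  ("talent", "hr"),
  ("people", "hr"),
  ("human resources", "hr"),
  ("legal", "legal"),
  ("legaltech", "legal"),
  ("compliance", "legal"),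
  ("regulatory", "legal")
]


def company_macros_py (c : List (String × List String)) : List String :=
  let enriched := PySem.Dict.getD (PySem.Dict.mk c) "category_macros" []
  if enriched ≠ [] then PySem.Set.ofList enriched
  else
    -- (cat or "").lower(): 'cat or ""' is the identity on str values, so it is '.lower()' alone
    let catsLower : PySem.Set String :=
      PySem.Set.ofList ((PySem.Dict.getD (PySem.Dict.mk c) "categories" []).map (fun cat => PySem.Str.lower cat))
    catMacrosLite.foldl
      (fun macros mk => if PySem.Set.inter catsLower mk.2 ≠ [] then PySem.Set.add macros mk.1 else macros)
      PySem.Set.empty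

-- ===== PORT B =====
def company_macros_py_alt (c : List (String × List String)) : List String :=
  let enriched := PySem.Dict.getD (PySem.Dict.mk c) "category_macros" []
  if enriched ≠ [] then PySem.Set.ofList enriched
  else
    let catsLower : PySem.Set String :=
      PySem.Set.ofList ((PySem.Dict.getD (PySem.Dict.mk c) "categories" []).map (fun cat => PySem.Str.lower cat))
    keywordToMacro.foldl
      (fun macros km => if PySem.Set.contains catsLower km.1 then PySem.Set.add macros km.2 else macros)
      PySem.Set.empty

-- ===== PRECONDITION & SPEC =====
def Spec_company_macros_py (c : List (String × List String)) (out : List String) : Prop := out = company_macros_py_alt c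
instance (c : List (String × List String)) (out : List String) : Decidable (Spec_company_macros_py c out) := by unfold Spec_company_macros_py; infer_instance

-- ===== CLAIM (what is proved, stated in full; the proofs are below) =====
def Claim_equal_company_macros_py : Prop := ∀ (c : List (String × List String)), Dom_company_macros_py c → Spec_company_macros_py c (company_macros_py c)

-- ===== LEMMAS AND PROOFS =====

-- B's flat table is A's table of groups, flattened with each keyword labelled by its macro.
theorem kwm_eq : keywordToMacro = catMacrosLite.flatMap (fun g => g.2.map (fun k => (k, g.1))) := by decide

theorem pvAddIdem (s : PySem.Set String) (m : String) :
    PySem.Set.add (PySem.Set.add s m) m = PySem.Set.add s m := by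
  apply PySem.Set.add_of_mem
  exact (PySem.Set.mem_add _ _ _).mpr (Or.inr rfl)

-- folding one macro's keyword group adds the macro exactly when some keyword is in cats
theorem group_fold (cats : PySem.Set String) (m : String) (kws : List String) (s : PySem.Set String) :
    (kws.map (fun k => (k, m))).foldl
        (fun macros km => if PySem.Set.contains cats km.1 then PySem.Set.add macros km.2 else macros) s
      = if kws.any (fun k => PySem.Set.contains cats k) then PySem.Set.add s m else s := by
  induction kws generalizing s with
  | nil => rfl
  | cons k kws ih =>
    simp only [List.map_cons, List.foldl_cons, List.any_cons, Bool.or_eq_true]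
    by_cases h : PySem.Set.contains cats k = true
    · rw [if_pos h, ih]
      by_cases h2 : (kws.any fun k => PySem.Set.contains cats k) = true
      · rw [if_pos h2, if_pos (Or.inl h), pvAddIdem]
      · rw [if_neg h2, if_pos (Or.inl h)]
    · rw [if_neg h, ih]
      by_cases h2 : (kws.any fun k => PySem.Set.contains cats k) = true
      · rw [if_pos h2, if_pos (Or.inr h2)]
      · rw [if_neg h2, if_neg (by rintro (hk | ha); exacts [h hk, h2 ha])]

theorem inter_ne_iff (cats : PySem.Set String) (kws : List String) :
    (PySem.Set.inter cats kws ≠ []) ↔ kws.any (fun k => PySem.Set.contains cats k) = true := by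
  rw [Ne, ← List.isEmpty_iff, Bool.not_eq_true, List.isEmpty_eq_false_iff_exists_mem]
  constructor
  · rintro ⟨x, hx⟩
    rw [PySem.Set.mem_inter _ _ _] at hx
    exact List.any_eq_true.mpr ⟨x, hx.2, (PySem.Set.contains_iff _ _).mpr hx.1⟩
  · intro h
    obtain ⟨x, hx, hc⟩ := List.any_eq_true.mp h
    exact ⟨x, (PySem.Set.mem_inter _ _ _).mpr ⟨(PySem.Set.contains_iff _ _).mp hc, hx⟩⟩

theorem flat_fold (cats : PySem.Set String) (groups : List (String × List String)) (s : PySem.Set String) :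
    (groups.flatMap (fun g => g.2.map (fun k => (k, g.1)))).foldl
        (fun macros km => if PySem.Set.contains cats km.1 then PySem.Set.add macros km.2 else macros) s
      = groups.foldl
          (fun macros mk => if PySem.Set.inter cats mk.2 ≠ [] then PySem.Set.add macros mk.1 else macros) s := by
  induction groups generalizing s with
  | nil => rfl
  | cons g groups ih =>
    simp only [List.flatMap_cons, List.foldl_append, List.foldl_cons, group_fold, ih]
    rw [if_congr (inter_ne_iff cats g.2) rfl rfl]

-- ===== VERDICT (by name: the statement is the Claim_ definition above) =====
theorem company_macros_py_spec : Claim_equal_company_macros_py := by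
  intro c _
  unfold Spec_company_macros_py company_macros_py company_macros_py_alt
  dsimp only []
  split_ifs with h
  · rfl
  · rw [kwm_eq, flat_fold]
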